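-- pv_equiv track=rewrite | github.com/nickson31/0Bullshit | investors/investors.py | _check_stage_match
-- ===== SOURCE A (Python) =====
-- from typing import List, Dict, Any, Optional, Tuple
--
-- def _check_stage_match(investor: Dict[str, Any], stage_keywords: List[str]) -> bool:
--     """
--     Verificar si hay match de etapa.
--     """
--     if not stage_keywords:
--         return False
--
--     for field in ["stage_general_en", "stage_general_es", "stage_strong_en", "stage_strong_es"]:
--         field_value = investor.get(field, "")
--         if field_value:
--             investor_stages = [stage.strip().lower() for stage in field_value.split(",")]
--             for keyword in stage_keywords:
--                 if keyword.lower() in investor_stages: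
--                     return True
--
--     return False
-- ===== SOURCE B (Python) =====
-- # B: build one combined set of normalized stages across the four fields, then do a single membership scan over the keywords (simpler, single-check shape).
-- def _check_stage_match(investor, stage_keywords):
--     all_stages = set()
--     for field in ("stage_general_en", "stage_general_es", "stage_strong_en", "stage_strong_es"):
--         value = investor.get(field, "")
--         if value:
--             for part in value.split(","):
--                 all_stages.add(part.strip().lower())
--     return any(k.lower() in all_stages for k in stage_keywords)
-- ===== Notes on version B (the rewrite author's own statement) =====
-- stated objective: simpler
-- what changed: Instead of scanning every keyword against each field's stage list inside a nested field-by-keyword loop with early return, B first builds one combined set of normalized stages from all four fields and then makes a single pass over the keywords checking membership; the empty-keyword guard disappears since any() over an empty list is already False.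
import Mathlib
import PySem

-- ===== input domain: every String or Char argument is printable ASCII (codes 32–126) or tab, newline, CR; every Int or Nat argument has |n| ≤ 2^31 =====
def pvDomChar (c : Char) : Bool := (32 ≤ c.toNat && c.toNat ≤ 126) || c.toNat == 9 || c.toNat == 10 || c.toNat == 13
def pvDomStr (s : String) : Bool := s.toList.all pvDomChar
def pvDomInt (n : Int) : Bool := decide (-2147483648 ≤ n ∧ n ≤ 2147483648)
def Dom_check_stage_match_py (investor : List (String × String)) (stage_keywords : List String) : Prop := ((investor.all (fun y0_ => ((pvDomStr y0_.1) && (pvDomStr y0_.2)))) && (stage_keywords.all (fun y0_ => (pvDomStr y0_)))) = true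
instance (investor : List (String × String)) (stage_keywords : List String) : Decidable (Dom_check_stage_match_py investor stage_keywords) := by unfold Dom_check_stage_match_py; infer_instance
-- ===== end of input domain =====

-- ===== PORT A =====
-- literal port of A: per-field scan over the four stage fields, early return on first keyword hit
def pvNormStages (fv : String) : List String :=
  ((PySem.Str.split? fv ",").getD []).map (fun st => PySem.Str.lower (PySem.Str.strip st))

def pvALoop (investor : List (String × String)) (stage_keywords : List String) :
    List String → Bool
  | [] => false
  | f :: rest =>
    let fv := PySem.Dict.getD (PySem.Dict.mk investor) f ""
    if fv ≠ "" then
      let investor_stages := pvNormStages fv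
      if stage_keywords.any (fun k => investor_stages.contains (PySem.Str.lower k)) then true
      else pvALoop investor stage_keywords rest
    else pvALoop investor stage_keywords rest

def check_stage_match_py (investor : List (String × String)) (stage_keywords : List String) : Bool :=
  if stage_keywords.isEmpty then false
  else pvALoop investor stage_keywords
    ["stage_general_en", "stage_general_es", "stage_strong_en", "stage_strong_es"]

-- ===== PORT B =====
-- port of B: build one combined PySem.Set of normalized stages, then a single membership pass over the keywords
def pvFields : List String :=
  ["stage_general_en", "stage_general_es", "stage_strong_en", "stage_strong_es"]

def check_stage_match_py_alt (investor : List (String × String)) (stage_keywords : List String) : Bool :=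
  let all_stages : PySem.Set String :=
    pvFields.foldl (fun acc f =>
      let v := PySem.Dict.getD (PySem.Dict.mk investor) f ""
      if v ≠ "" then
        ((PySem.Str.split? v ",").getD []).foldl
          (fun s part => PySem.Set.add s (PySem.Str.lower (PySem.Str.strip part))) acc
      else acc) PySem.Set.empty
  stage_keywords.any (fun k => PySem.Set.contains all_stages (PySem.Str.lower k))

-- ===== PRECONDITION & SPEC =====
def Spec_check_stage_match_py (investor : List (String × String)) (stage_keywords : List String) (out : Bool) : Prop := out = check_stage_match_py_alt investor stage_keywords
instance (investor : List (String × String)) (stage_keywords : List String) (out : Bool) : Decidable (Spec_check_stage_match_py investor stage_keywords out) := by unfold Spec_check_stage_match_py; infer_instance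

-- ===== CLAIM (what is proved, stated in full; the proofs are below) =====
def Claim_equal_check_stage_match_py : Prop := ∀ (investor : List (String × String)) (stage_keywords : List String), Dom_check_stage_match_py investor stage_keywords → Spec_check_stage_match_py investor stage_keywords (check_stage_match_py investor stage_keywords)

-- ===== LEMMAS AND PROOFS =====

-- A's early-return loop over the fields is the boolean ∃ over the fields
theorem pvALoop_eq_any (investor : List (String × String)) (sk : List String) (fs : List String) :
    pvALoop investor sk fs = fs.any (fun f =>
      let fv := PySem.Dict.getD (PySem.Dict.mk investor) f ""
      decide (fv ≠ "") && sk.any (fun k => (pvNormStages fv).contains (PySem.Str.lower k))) := by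
  induction fs with
  | nil => rfl
  | cons f rest ih =>
    simp only [pvALoop, List.any_cons, ih]
    rw [Bool.eq_iff_iff]
    by_cases h : PySem.Dict.getD (PySem.Dict.mk investor) f "" ≠ "" <;>
      split_ifs <;> simp_all

-- membership in B's accumulated set: an element is in the fold iff it is in the
-- accumulator or comes from some field with a nonempty value
theorem pv_mem_fold (investor : List (String × String)) (fs : List String)
    (acc : PySem.Set String) (x : String) :
    (x ∈ fs.foldl (fun acc f =>
      let v := PySem.Dict.getD (PySem.Dict.mk investor) f ""
      if v ≠ "" then
        ((PySem.Str.split? v ",").getD []).foldl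
          (fun s part => PySem.Set.add s (PySem.Str.lower (PySem.Str.strip part))) acc
      else acc) acc) ↔
    (x ∈ acc ∨ ∃ f ∈ fs, PySem.Dict.getD (PySem.Dict.mk investor) f "" ≠ "" ∧
      x ∈ pvNormStages (PySem.Dict.getD (PySem.Dict.mk investor) f "")) := by
  induction fs generalizing acc with
  | nil => simp
  | cons f rest ih =>
    simp only [List.foldl_cons]
    by_cases h : PySem.Dict.getD (PySem.Dict.mk investor) f "" ≠ ""
    · rw [if_pos h, ih, ← PySem.Set.update_map_eq_foldl_add]
      rw [PySem.Set.mem_update]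
      simp only [pvNormStages, or_assoc]
      constructor
      · rintro (hx | hm | ⟨g, hg, hne, hm⟩)
        · exact Or.inl hx
        · exact Or.inr ⟨f, List.mem_cons_self .., h, hm⟩
        · exact Or.inr ⟨g, List.mem_cons_of_mem _ hg, hne, hm⟩
      · rintro (hx | ⟨g, hg, hne, hm⟩)
        · exact Or.inl hx
        · rcases List.mem_cons.mp hg with rfl | hg'
          · exact Or.inr (Or.inl hm)
          · exact Or.inr (Or.inr ⟨g, hg', hne, hm⟩)
    · rw [if_neg h, ih]
      simp only [not_not] at h
      constructor
      · rintro (hx | ⟨g, hg, hne, hm⟩)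
        · exact Or.inl hx
        · exact Or.inr ⟨g, List.mem_cons_of_mem _ hg, hne, hm⟩
      · rintro (hx | ⟨g, hg, hne, hm⟩)
        · exact Or.inl hx
        · rcases List.mem_cons.mp hg with rfl | hg'
          · exact absurd h hne
          · exact Or.inr ⟨g, hg', hne, hm⟩

theorem check_stage_eq (investor : List (String × String)) (sk : List String) :
    check_stage_match_py investor sk = check_stage_match_py_alt investor sk := by
  unfold check_stage_match_py check_stage_match_py_alt
  rcases sk with _ | ⟨k, ks⟩
  · simp
  · simp only [List.isEmpty_cons, if_neg Bool.false_ne_true, pvALoop_eq_any]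
    rw [Bool.eq_iff_iff]
    simp only [List.any_eq_true, PySem.Set.contains_iff, pv_mem_fold, pvFields,
      PySem.Set.empty, List.contains_iff_mem, Bool.and_eq_true, decide_eq_true_eq,
      List.not_mem_nil, false_or]
    constructor
    · rintro ⟨f, hf, hne, kw, hkw, hmem⟩
      exact ⟨kw, hkw, f, hf, hne, hmem⟩
    · rintro ⟨kw, hkw, f, hf, hne, hmem⟩
      exact ⟨f, hf, hne, kw, hkw, hmem⟩

-- ===== VERDICT (by name: the statement is the Claim_ definition above) =====
theorem check_stage_match_py_spec : Claim_equal_check_stage_match_py := by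
  intro investor sk _
  unfold Spec_check_stage_match_py
  exact check_stage_eq investor sk
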